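-- pv_equiv track=rewrite | github.com/daniel-reich/turbo-robot | HaMCeHeJkaWvMg7LS_18.py | sun_loungers
-- ===== SOURCE A (Python) =====
-- def sun_loungers(beach):
--     count = 0
--     beach2 = '0'
--     for i,j in enumerate(beach):
--         foll = beach[i + 1] if i + 1 < len(beach) else '0'
--         prev = beach2[i]
--         if j == '0':
--             if prev == '0' and foll == '0':
--                 count += 1
--                 beach2 += '1'
--             else:
--                 beach2 += j
--         else:
--             beach2 += j
--     return count
-- ===== SOURCE B (Python) =====
-- def sun_loungers(beach):
--     # Split into maximal runs of '0'; closed-form greedy count per run.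
--     norm = ''.join('0' if c == '0' else '1' for c in beach)
--     runs = norm.split('1')
--     last = len(runs) - 1
--     total = 0
--     for k, run in enumerate(runs):
--         eff = len(run) - (0 if k == 0 else 1) - (0 if k == last else 1)
--         if eff > 0:
--             total += (eff + 1) // 2
--     return total
-- ===== Notes on version B (the rewrite author's own statement) =====
-- stated objective: alternative
-- what changed: Replaces the cell-by-cell greedy that grows a shadow string beach2 with a run decomposition: normalise the beach, split it into maximal runs of free cells, and sum a closed-form count per run from its length and whether each end is open.
import Mathlib
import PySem

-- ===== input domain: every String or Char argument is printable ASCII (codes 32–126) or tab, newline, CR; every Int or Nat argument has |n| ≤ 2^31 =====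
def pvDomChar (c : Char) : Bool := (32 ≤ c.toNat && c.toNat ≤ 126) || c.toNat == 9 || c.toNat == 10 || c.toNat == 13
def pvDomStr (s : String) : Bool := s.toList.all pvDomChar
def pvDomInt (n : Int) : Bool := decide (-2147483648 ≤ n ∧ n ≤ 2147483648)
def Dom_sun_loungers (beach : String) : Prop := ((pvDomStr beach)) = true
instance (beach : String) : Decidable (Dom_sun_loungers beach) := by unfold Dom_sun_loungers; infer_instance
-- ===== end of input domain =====

-- B replaces A's cell-by-cell greedy (with its growing shadow string) by splitting the
-- beach into maximal runs of free cells and summing a closed-form count per run (objective: alternative).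

-- ===== PORT A =====
def sun_loungers (beach : String) : Int :=
  let bl := beach.toList
  (((PySem.List.enumerate bl 0).foldl (fun (st : Int × List Char) ij =>
      let i := ij.1
      let j := ij.2
      let foll := if i + 1 < (bl.length : Int) then (PySem.List.pyGet? bl (i + 1)).getD '0' else '0'
      let prev := (PySem.List.pyGet? st.2 i).getD '0'
      if j = '0' then
        if prev = '0' ∧ foll = '0' then (st.1 + 1, st.2 ++ ['1'])
        else (st.1, st.2 ++ [j])
      else (st.1, st.2 ++ [j])) (0, ['0']))).1

-- ===== PORT B =====
-- hand-written port of Python's str.split('1') on the normalised string (exact: split on a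
-- single separator char, keeping empty pieces, always at least one piece)
def pvSplitOne : List Char → List (List Char)
  | [] => [[]]
  | x :: xs =>
    match pvSplitOne xs with
    | [] => [[]]    -- unreachable: pvSplitOne never returns []
    | r :: rs => if x = '1' then [] :: r :: rs else (x :: r) :: rs

def sun_loungers_alt (beach : String) : Int :=
  let norm := beach.toList.map (fun c => if c = '0' then '0' else '1')
  let runs := pvSplitOne norm
  let last : Int := (runs.length : Int) - 1
  (PySem.List.enumerate runs 0).foldl (fun total kr =>
    let eff : Int := (kr.2.length : Int) - (if kr.1 = 0 then 0 else 1) - (if kr.1 = last then 0 else 1)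
    if 0 < eff then total + PySem.Int.floordiv (eff + 1) 2 else total) 0

-- ===== PRECONDITION & SPEC =====
def Spec_sun_loungers (beach : String) (out : Int) : Prop := out = sun_loungers_alt beach
instance (beach : String) (out : Int) : Decidable (Spec_sun_loungers beach out) := by unfold Spec_sun_loungers; infer_instance

-- ===== CLAIM (what is proved, stated in full; the proofs are below) =====
def Claim_equal_sun_loungers : Prop := ∀ (beach : String), Dom_sun_loungers beach → Spec_sun_loungers beach (sun_loungers beach)

-- ===== LEMMAS AND PROOFS =====

-- greedy as a simple recursion: p = "previous cell is free in the updated beach"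
def pvG : List Char → Bool → Int
  | [], _ => 0
  | c :: cs, p =>
    if c = '0' ∧ p = true ∧ cs.headD '0' = '0' then 1 + pvG cs false
    else pvG cs (decide (c = '0'))

-- closed-form count for one run of free cells: length L, left end open p, right end open ro
def pvCnt (L : Nat) (p ro : Bool) : Int :=
  let eff : Int := (L : Int) - (if p then 0 else 1) - (if ro then 0 else 1)
  if 0 < eff then (eff + 1) / 2 else 0

-- per-run sum: first run's left end open iff p; only last run's right end open
def pvS : List (List Char) → Bool → Int
  | [], _ => 0
  | [r], p => pvCnt r.length p true
  | r :: rs, p => pvCnt r.length p false + pvS rs false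

theorem pvSplitOne_ne_nil (l : List Char) : pvSplitOne l ≠ [] := by
  cases l with
  | nil => simp [pvSplitOne]
  | cons x xs =>
    simp only [pvSplitOne]
    rcases h : pvSplitOne xs with _ | ⟨r, rs⟩ <;> simp <;> split <;> simp

theorem pvLoopA (bl : List Char) (l : List Char) (k : Nat) (count : Int) (b2 : List Char) (lc : Char)
    (hdrop : bl.drop k = l) (hlen : b2.length = k + 1) (hlast : b2.getLast? = some lc) :
    ((PySem.List.enumerate l (k : Int)).foldl (fun (st : Int × List Char) ij =>
      let i := ij.1
      let j := ij.2
      let foll := if i + 1 < (bl.length : Int) then (PySem.List.pyGet? bl (i + 1)).getD '0' else '0'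
      let prev := (PySem.List.pyGet? st.2 i).getD '0'
      if j = '0' then
        if prev = '0' ∧ foll = '0' then (st.1 + 1, st.2 ++ ['1'])
        else (st.1, st.2 ++ [j])
      else (st.1, st.2 ++ [j])) (count, b2)).1 = count + pvG l (decide (lc = '0')) := by
  induction l generalizing k count b2 lc with
  | nil => simp [PySem.List.enumerate_nil, pvG]
  | cons c l' ih =>
    rw [PySem.List.enumerate_cons]
    simp only [List.foldl_cons]
    have hk : k < bl.length := by
      by_contra h
      rw [List.drop_eq_nil_of_le (by omega)] at hdrop
      exact (List.cons_ne_nil c l') hdrop.symm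
    have hdrop' : bl.drop (k+1) = l' := by
      have h1 : (bl.drop k).drop 1 = bl.drop (k + 1) := by rw [List.drop_drop]
      rw [← h1, hdrop]
      simp
    have hfoll : (if (k : Int) + 1 < (bl.length : Int) then (PySem.List.pyGet? bl ((k : Int) + 1)).getD '0' else '0') = l'.headD '0' := by
      have hget : PySem.List.pyGet? bl ((k : Int) + 1) = bl[k+1]? := by
        have : (k : Int) + 1 = ((k + 1 : Nat) : Int) := by push_cast; ring
        rw [this, PySem.List.pyGet?_natCast]
      have hhead : l'.headD '0' = bl[k+1]?.getD '0' := by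
        rw [← hdrop', List.headD_eq_head?, List.head?_drop]
      rw [hget, hhead]
      split
      · rfl
      · rename_i hge
        rw [List.getElem?_eq_none_iff.mpr (by omega)]
        rfl
    have hprev : (PySem.List.pyGet? b2 (k : Int)).getD '0' = lc := by
      rw [PySem.List.pyGet?_natCast]
      rw [List.getLast?_eq_getElem?] at hlast
      rw [hlen] at hlast
      simp only [Nat.add_sub_cancel] at hlast
      rw [hlast]
      rfl
    simp only [hfoll, hprev]
    by_cases hc : c = '0'
    · by_cases hcond : lc = '0' ∧ l'.headD '0' = '0'
      · rw [if_pos hc, if_pos hcond]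
        have := ih (k+1) (count + 1) (b2 ++ ['1']) '1' hdrop' (by simp [hlen]) (by simp)
        rw [show ((k:Int) + 1) = (((k+1 : Nat)) : Int) by push_cast; ring] at *
        rw [this]
        rw [pvG]
        rw [if_pos (by exact ⟨hc, by simp [hcond.1], hcond.2⟩)]
        simp
        ring
      · rw [if_pos hc, if_neg hcond]
        have := ih (k+1) count (b2 ++ [c]) c hdrop' (by simp [hlen]) (by simp)
        rw [show ((k:Int) + 1) = (((k+1 : Nat)) : Int) by push_cast; ring] at *
        rw [this]
        rw [pvG]
        rw [if_neg (by rintro ⟨-, h1, h2⟩; exact hcond ⟨by simpa using h1, h2⟩)]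
    · rw [if_neg hc]
      have := ih (k+1) count (b2 ++ [c]) c hdrop' (by simp [hlen]) (by simp)
      rw [show ((k:Int) + 1) = (((k+1 : Nat)) : Int) by push_cast; ring] at *
      rw [this]
      rw [pvG]
      rw [if_neg (by simp [hc])]

theorem pvA_eq_g (beach : String) : sun_loungers beach = pvG beach.toList true := by
  unfold sun_loungers
  have := pvLoopA beach.toList beach.toList 0 0 ['0'] '0' (by simp) (by simp) (by simp)
  simp only [Nat.cast_zero] at this
  rw [this]
  simp

theorem pvFloordiv_two (n : Int) : PySem.Int.floordiv n 2 = n / 2 := by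
  simp [PySem.Int.floordiv]
  rw [Int.fdiv_eq_ediv]
  simp

theorem pvLoopB (R : Nat) (rs : List (List Char)) (k : Nat) (total : Int)
    (hne : rs ≠ []) (hlen : k + rs.length = R) :
    (PySem.List.enumerate rs (k : Int)).foldl (fun total kr =>
      let eff : Int := (kr.2.length : Int) - (if kr.1 = 0 then 0 else 1) -
        (if kr.1 = (R : Int) - 1 then 0 else 1)
      if 0 < eff then total + PySem.Int.floordiv (eff + 1) 2 else total) total
    = total + pvS rs (decide (k = 0)) := by
  induction rs generalizing k total with
  | nil => exact absurd rfl hne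
  | cons r rs' ih =>
    rw [PySem.List.enumerate_cons]
    simp only [List.foldl_cons]
    have hflag1 : ((k : Int) = 0) ↔ (k = 0) := by omega
    cases rs' with
    | nil =>
      have hflag2 : ((k : Int) = (R : Int) - 1) := by simp at hlen; omega
      rw [PySem.List.enumerate_nil]
      simp only [List.foldl_nil, pvS, pvCnt, pvFloordiv_two, if_pos hflag2]
      by_cases hk0 : k = 0 <;> simp [hk0] <;> split <;> first | ring | omega
    | cons r2 rs'' =>
      have hflag2 : ¬((k : Int) = (R : Int) - 1) := by simp at hlen ⊢; omega
      have hstep : (k : Int) + 1 = ((k + 1 : Nat) : Int) := by push_cast; ring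
      rw [hstep, ih (k+1) _ (by simp) (by simp at hlen ⊢; omega)]
      simp only [pvS, pvCnt, pvFloordiv_two, if_neg hflag2, decide_eq_false (by omega : ¬(k + 1 = 0))]
      by_cases hk0 : k = 0 <;> simp [hk0] <;> split <;> first | ring | omega

theorem pvB_eq (beach : String) :
    sun_loungers_alt beach =
      pvS (pvSplitOne (beach.toList.map (fun c => if c = '0' then '0' else '1'))) true := by
  unfold sun_loungers_alt
  have hne := pvSplitOne_ne_nil (beach.toList.map (fun c => if c = '0' then '0' else '1'))
  have := pvLoopB (pvSplitOne (beach.toList.map (fun c => if c = '0' then '0' else '1'))).length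
    (pvSplitOne (beach.toList.map (fun c => if c = '0' then '0' else '1'))) 0 0 hne (by simp)
  simp only [Nat.cast_zero] at this
  rw [this]
  simp

theorem pvG_norm (l : List Char) (p : Bool) :
    pvG (l.map (fun c => if c = '0' then '0' else '1')) p = pvG l p := by
  induction l generalizing p with
  | nil => rfl
  | cons c l' ih =>
    simp only [List.map_cons, pvG]
    have hc : ((if c = '0' then '0' else '1') = '0') ↔ (c = '0') := by
      split <;> simp_all
    have hh : ((l'.map (fun c => if c = '0' then '0' else '1')).headD '0' = '0') ↔ (l'.headD '0' = '0') := by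
      cases l' with
      | nil => simp
      | cons d l'' =>
        simp only [List.map_cons, List.headD_cons]
        split <;> simp_all
    by_cases hcond : c = '0' ∧ p = true ∧ l'.headD '0' = '0'
    · rw [if_pos (by exact ⟨hc.mpr hcond.1, hcond.2.1, hh.mpr hcond.2.2⟩), if_pos hcond, ih]
    · rw [if_neg (by rintro ⟨h1, h2, h3⟩; exact hcond ⟨hc.mp h1, h2, hh.mp h3⟩), if_neg hcond]
      have : decide ((if c = '0' then '0' else '1') = '0') = decide (c = '0') := by
        by_cases h : c = '0' <;> simp [h]
      rw [this, ih]

-- all chars '0'/'1': greedy equals the per-run closed-form sum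
theorem pvG_eq_pvS (m : List Char) (hm : ∀ c ∈ m, c = '0' ∨ c = '1') (p : Bool) :
    pvG m p = pvS (pvSplitOne m) p := by
  induction m generalizing p with
  | nil =>
    simp only [pvG, pvSplitOne, pvS, pvCnt]
    cases p <;> simp
  | cons c m' ih =>
    have hm' : ∀ c ∈ m', c = '0' ∨ c = '1' := fun d hd => hm d (List.mem_cons_of_mem c hd)
    obtain ⟨r, rs, hsplit⟩ : ∃ r rs, pvSplitOne m' = r :: rs := by
      rcases h : pvSplitOne m' with _ | ⟨r, rs⟩
      · exact absurd h (pvSplitOne_ne_nil m')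
      · exact ⟨r, rs, rfl⟩
    rcases hm c (List.mem_cons_self) with hc | hc
    · -- c = '0' : the run grows
      subst hc
      have hsplit0 : pvSplitOne ('0' :: m') = ('0' :: r) :: rs := by
        simp only [pvSplitOne, hsplit]
        rw [if_neg (by decide)]
      by_cases hcond : p = true ∧ m'.headD '0' = '0'
      · -- place a lounger here
        have hr : (m' = [] ∧ r = [] ∧ rs = []) ∨ 1 ≤ r.length := by
          cases m' with
          | nil =>
            left
            simp only [pvSplitOne] at hsplit
            exact ⟨rfl, by injection hsplit with h1 h2; simp [h1.symm], by injection hsplit with h1 h2; simp [h2.symm]⟩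
          | cons d m'' =>
            right
            have hd : d = '0' := by simpa using hcond.2
            subst hd
            rcases h2 : pvSplitOne m'' with _ | ⟨r2, rs2⟩
            · exact absurd h2 (pvSplitOne_ne_nil m'')
            · simp only [pvSplitOne, h2] at hsplit
              rw [if_neg (by decide)] at hsplit
              injection hsplit with h3 h4
              simp [← h3]
        rw [pvG, if_pos ⟨rfl, hcond.1, hcond.2⟩, ih hm' false, hsplit, hsplit0]
        rcases hr with ⟨hm0, hr0, hrs0⟩ | hr1
        · subst hm0; subst hr0; subst hrs0
          simp [pvS, pvCnt, hcond.1]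
        · cases rs with
          | nil =>
            simp only [pvS, pvCnt, hcond.1, List.length_cons]
            push_cast
            split <;> split <;> omega
          | cons r2 rs' =>
            simp only [pvS, pvCnt, hcond.1, List.length_cons]
            push_cast
            have h1 : (1 : Int) ≤ r.length := by exact_mod_cast hr1
            split <;> split <;> omega
      · -- no lounger at this cell
        rw [pvG, if_neg (by rintro ⟨-, h2, h3⟩; exact hcond ⟨h2, h3⟩)]
        rw [show (decide ('0' = '0')) = true by decide, ih hm' true, hsplit, hsplit0]
        cases p with
        | false =>
          cases rs with
          | nil => simp only [pvS, pvCnt, List.length_cons]; push_cast; split <;> split <;> omega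
          | cons r2 rs' => simp only [pvS, pvCnt, List.length_cons]; push_cast; split <;> split <;> omega
        | true =>
          have hhead : ¬ (m'.headD '0' = '0') := fun h => hcond ⟨rfl, h⟩
          cases m' with
          | nil => exact absurd rfl hhead
          | cons d m'' =>
            have hd : d = '1' := by
              rcases hm' d List.mem_cons_self with h | h
              · exact absurd (by simpa using h) hhead
              · exact h
            subst hd
            obtain ⟨r2, rs2, h2⟩ : ∃ r2 rs2, pvSplitOne m'' = r2 :: rs2 := by
              rcases h2 : pvSplitOne m'' with _ | ⟨r2, rs2⟩
              · exact absurd h2 (pvSplitOne_ne_nil m'')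
              · exact ⟨r2, rs2, rfl⟩
            have : pvSplitOne ('1' :: m'') = [] :: r2 :: rs2 := by simp [pvSplitOne, h2]
            rw [this] at hsplit
            injection hsplit with h3 h4
            subst h3
            rw [← h4]
            simp only [pvS, pvCnt, List.length_cons, List.length_nil]
            norm_num
    · -- c = '1' : a separator
      subst hc
      have hsplit1 : pvSplitOne ('1' :: m') = [] :: r :: rs := by
        simp [pvSplitOne, hsplit]
      rw [pvG, if_neg (by rintro ⟨h1, -, -⟩; exact absurd h1 (by decide))]
      rw [show (decide ('1' = '0')) = false by decide, ih hm' false, hsplit, hsplit1]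
      simp only [pvS, pvCnt, List.length_nil]
      cases p <;> simp

-- ===== VERDICT (by name: the statement is the Claim_ definition above) =====
theorem sun_loungers_spec : Claim_equal_sun_loungers := by
  intro beach _
  unfold Spec_sun_loungers
  rw [pvB_eq, pvA_eq_g, ← pvG_norm]
  exact pvG_eq_pvS _ (by
    intro c hc
    simp only [List.mem_map] at hc
    obtain ⟨d, -, hd⟩ := hc
    subst hd
    by_cases h : d = '0'
    · exact Or.inl (by simp [h])
    · exact Or.inr (by simp [h])) true
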